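-- pv_equiv track=rewrite | github.com/tad315/PYTHON-code.ptit | codeptit/PY02060-LCMNHONHAT.py | cntPair
-- ===== SOURCE A (Python) =====
-- MOD = 10**9 + 7
--
-- def cntPair(a, b, primes):
--     ans = 1
--     a1 = a - 1
--     for p in primes:
--         if p > b: break
--         e = 0
--         pp = p
--         while pp <= b:
--             e += b // pp - (a1 // pp)
--             pp *= p
--         ans = (ans * (2 * e + 1)) % MOD
--     return ans
-- ===== SOURCE B (Python) =====
-- MOD = 10**9 + 7
--
-- def _leg(n, p):
--     # exponent of p in n! (Legendre), recursively: L(n) = n//p + L(n//p)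
--     return 0 if n <= 0 else n // p + _leg(n // p, p)
--
-- def cntPair(a, b, primes):
--     k = 0
--     while k < len(primes) and primes[k] <= b:
--         k += 1
--     factors = [(2 * (_leg(b, p) - _leg(a - 1, p)) + 1) % MOD for p in primes[:k]]
--     ans = 1
--     for f in factors:
--         ans = ans * f % MOD
--     return ans
-- ===== Notes on version B (the rewrite author's own statement) =====
-- stated objective: alternative
-- what changed: B is staged: an index scan first finds the usable prefix of primes (those <= b, up to the first larger one), a comprehension maps each such prime to its reduced factor (2*(leg(b,p)-leg(a-1,p))+1) % MOD computed by a recursive Legendre function L(n)=n//p+L(n//p) instead of A's loop over the powers p^k, and a final fold multiplies the factors mod MOD; A is one fused loop with break and a geometric inner while over p^k.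
-- outside the precondition, e.g. on cntPair(0, 8, [2]): A returns 21, B returns 15; on cntPair(10, 3, [2]): A returns 1000000002, B returns 999999996; on cntPair(2, 21, [-2]): A returns 999999996, B returns 999999988
import Mathlib
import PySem

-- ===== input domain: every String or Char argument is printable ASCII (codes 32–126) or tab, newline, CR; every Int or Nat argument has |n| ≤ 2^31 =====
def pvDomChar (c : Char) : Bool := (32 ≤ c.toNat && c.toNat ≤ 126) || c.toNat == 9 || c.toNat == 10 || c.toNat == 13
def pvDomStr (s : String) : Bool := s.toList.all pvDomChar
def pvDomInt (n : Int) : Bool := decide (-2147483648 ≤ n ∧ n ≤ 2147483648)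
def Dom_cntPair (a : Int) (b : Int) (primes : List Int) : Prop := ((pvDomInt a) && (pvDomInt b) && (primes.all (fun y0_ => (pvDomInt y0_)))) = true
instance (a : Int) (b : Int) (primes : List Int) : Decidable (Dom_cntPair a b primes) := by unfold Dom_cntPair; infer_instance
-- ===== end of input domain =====

-- B is staged (prefix scan, a map to reduced factors using a recursive Legendre
-- exponent L(n) = n//p + L(n//p), then a product fold) where A is one fused loop
-- with a geometric inner while over the powers p^k (objective: alternative).

def pvMOD : Int := 1000000007

-- ===== PORT A =====
-- inner while loop of A, written with a fuel parameter that only makes the recursion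
-- total (Python diverges or raises for p ≤ 1); under Pre_ the fuel used at the call
-- site, (b + 1 - pp).toNat, always outlasts the loop, so the fuel never runs out.
def pvAInner (fuel : Nat) (b a1 p pp e : Int) : Int :=
  match fuel with
  | 0 => e
  | f + 1 =>
    if pp ≤ b then
      pvAInner f b a1 p (pp * p) (e + PySem.Int.floordiv b pp - PySem.Int.floordiv a1 pp)
    else e

def pvAGo (b a1 : Int) : List Int → Int → Int
  | [], ans => ans
  | p :: ps, ans =>
    if p > b then ans
    else pvAGo b a1 ps (PySem.Int.mod (ans * (2 * pvAInner (b + 1 - p).toNat b a1 p p 0 + 1)) pvMOD)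

def cntPair (a : Int) (b : Int) (primes : List Int) : Int :=
  pvAGo b (a - 1) primes 1

-- ===== PORT B =====
-- recursive _leg of Source B; fuel n.toNat is only a totality guard (the Python recursion
-- diverges for p = 1 and raises for p = 0, both outside Pre_): for p ≥ 2 the argument
-- strictly decreases, so the fuel never runs out under Pre_.
def pvLegF (fuel : Nat) (n p : Int) : Int :=
  match fuel with
  | 0 => 0
  | f + 1 =>
    if n ≤ 0 then 0
    else PySem.Int.floordiv n p + pvLegF f (PySem.Int.floordiv n p) p

def pvLeg (n p : Int) : Int := pvLegF n.toNat n p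

-- the index scan `while k < len(primes) and primes[k] <= b: k += 1` of Source B
def pvK (b : Int) (primes : List Int) (k : Nat) : Nat :=
  if h : k < primes.length then
    if primes[k] ≤ b then pvK b primes (k + 1) else k
  else k
termination_by primes.length - k

def cntPair_alt (a : Int) (b : Int) (primes : List Int) : Int :=
  let k := pvK b primes 0
  let factors := (PySem.List.slice primes none (some (k : Int))).map
      (fun p => PySem.Int.mod (2 * (pvLeg b p - pvLeg (a - 1) p) + 1) pvMOD)
  factors.foldl (fun ans f => PySem.Int.mod (ans * f) pvMOD) 1

-- ===== PRECONDITION & SPEC =====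
-- Pre_ constrains only the prefix of primes the loop actually processes (entries up to the
-- first one > b): processed entries must be ≥ 2 (for p = 1 A diverges, for p = 0 it raises
-- ZeroDivisionError, for p < 0 it returns sign-dependent floor artefacts), and when that
-- prefix is non-empty the range must satisfy 1 ≤ a ≤ b + 1 (outside it A returns
-- negative-floor contributions meaningless for the counting task).
def Pre_cntPair (a : Int) (b : Int) (primes : List Int) : Prop :=
  (∀ p ∈ primes.takeWhile (fun p => decide (p ≤ b)), 2 ≤ p) ∧
    (primes.takeWhile (fun p => decide (p ≤ b)) = [] ∨ (1 ≤ a ∧ a ≤ b + 1))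
instance (a : Int) (b : Int) (primes : List Int) : Decidable (Pre_cntPair a b primes) := by
  unfold Pre_cntPair; infer_instance

def pvWitness_cntPair : Int × Int × List Int := (2, 10, [2, 3, 5, 7])

def Spec_cntPair (a : Int) (b : Int) (primes : List Int) (out : Int) : Prop := out = cntPair_alt a b primes
instance (a : Int) (b : Int) (primes : List Int) (out : Int) : Decidable (Spec_cntPair a b primes out) := by unfold Spec_cntPair; infer_instance

-- ===== CLAIM (what is proved, stated in full; the proofs are below) =====
def Claim_equal_cntPair : Prop := ∀ (a : Int) (b : Int) (primes : List Int), Dom_cntPair a b primes → Pre_cntPair a b primes → Spec_cntPair a b primes (cntPair a b primes)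

-- ===== LEMMAS AND PROOFS =====

-- mathematical Legendre sum: M p n = n/p + M p (n/p), the common value of both loops
def pvMleg (p n : Int) : Int :=
  if h : 0 < n ∧ 2 ≤ p then n / p + pvMleg p (n / p) else 0
termination_by n.toNat
decreasing_by
  have h1 : n / p < n := by
    rw [← PySem.Int.floordiv_eq_ediv_of_pos (show (0:Int) < p by omega),
      PySem.Int.floordiv_lt_iff_lt_mul (by omega)]
    nlinarith [h.1, h.2]
  omega

theorem pvMleg_zero (p : Int) : pvMleg p 0 = 0 := by rw [pvMleg]; simp

theorem pvMleg_rec (p n : Int) (hp : 2 ≤ p) (hn : 0 ≤ n) :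
    pvMleg p n = n / p + pvMleg p (n / p) := by
  by_cases h : 0 < n
  · rw [pvMleg, dif_pos ⟨h, hp⟩]
  · have : n = 0 := by omega
    subst this
    simp [pvMleg_zero]

theorem pvLegF_eq (p : Int) (hp : 2 ≤ p) :
    ∀ (f : Nat) (n : Int), 0 ≤ n → n.toNat ≤ f → pvLegF f n p = pvMleg p n := by
  intro f
  induction f with
  | zero =>
    intro n hn hf
    have : n = 0 := by omega
    subst this
    rw [pvLegF, pvMleg_zero]
  | succ f ih =>
    intro n hn hf
    by_cases h : n ≤ 0
    · have : n = 0 := by omega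
      subst this
      rw [pvLegF, if_pos le_rfl, pvMleg_zero]
    · rw [pvLegF, if_neg h]
      rw [PySem.Int.floordiv_eq_ediv_of_pos (by omega)]
      have hlt : n / p < n := by
        rw [← PySem.Int.floordiv_eq_ediv_of_pos (show (0:Int) < p by omega),
          PySem.Int.floordiv_lt_iff_lt_mul (by omega)]
        nlinarith
      have hge : 0 ≤ n / p := Int.ediv_nonneg (by omega) (by omega)
      rw [ih (n / p) hge (by omega), pvMleg_rec p n hp (by omega)]

theorem pvLeg_eq (n p : Int) (hp : 2 ≤ p) (hn : 0 ≤ n) : pvLeg n p = pvMleg p n :=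
  pvLegF_eq p hp n.toNat n hn le_rfl

theorem pvAInner_eq (p b a1 : Int) (hp : 2 ≤ p) (ha : 0 ≤ a1) (hab : a1 ≤ b) :
    ∀ (f : Nat) (pp e : Int), 1 ≤ pp → (b + 1 - pp).toNat ≤ f →
      pvAInner f b a1 p pp e =
        e + (b / pp + pvMleg p (b / pp)) - (a1 / pp + pvMleg p (a1 / pp)) := by
  intro f
  induction f with
  | zero =>
    intro pp e hpp hf
    have hppb : b < pp := by omega
    rw [pvAInner]
    have hb0 : b / pp = 0 := Int.ediv_eq_zero_of_lt (by omega) (by omega)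
    have ha0 : a1 / pp = 0 := Int.ediv_eq_zero_of_lt ha (by omega)
    rw [hb0, ha0, pvMleg_zero]
    ring
  | succ f ih =>
    intro pp e hpp hf
    by_cases h : pp ≤ b
    · rw [pvAInner, if_pos h]
      rw [PySem.Int.floordiv_eq_ediv_of_pos (by omega), PySem.Int.floordiv_eq_ediv_of_pos (by omega)]
      have h2 : pp * 2 ≤ pp * p := mul_le_mul_of_nonneg_left hp (by omega)
      rw [ih (pp * p) _ (by omega) (by omega)]
      have hbc : b / pp / p = b / (pp * p) := Int.ediv_ediv_of_nonneg (by omega)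
      have hac : a1 / pp / p = a1 / (pp * p) := Int.ediv_ediv_of_nonneg (by omega)
      rw [← hbc, ← hac]
      rw [pvMleg_rec p (b / pp) hp (Int.ediv_nonneg (by omega) (by omega))]
      rw [pvMleg_rec p (a1 / pp) hp (Int.ediv_nonneg ha (by omega))]
      ring
    · rw [pvAInner, if_neg h]
      have hb0 : b / pp = 0 := Int.ediv_eq_zero_of_lt (by omega) (by omega)
      have ha0 : a1 / pp = 0 := Int.ediv_eq_zero_of_lt ha (by omega)
      rw [hb0, ha0, pvMleg_zero]
      ring

-- per-prime agreement: A's power loop = difference of B's recursive Legendre values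
theorem pvInner_prime (p b a1 : Int) (hp : 2 ≤ p) (ha : 0 ≤ a1) (hab : a1 ≤ b) :
    pvAInner (b + 1 - p).toNat b a1 p p 0 = pvLeg b p - pvLeg a1 p := by
  rw [pvLeg_eq b p hp (by omega), pvLeg_eq a1 p hp ha]
  rw [pvAInner_eq p b a1 hp ha hab (b + 1 - p).toNat p 0 (by omega) le_rfl]
  rw [pvMleg_rec p b hp (by omega), pvMleg_rec p a1 hp ha]
  ring

-- B's index scan computes the length of the ≤ b prefix
theorem pvK_takeWhile (b : Int) (primes : List Int) :
    ∀ k, pvK b primes k = k + ((primes.drop k).takeWhile (fun p => decide (p ≤ b))).length := by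
  intro k
  induction hk : primes.length - k using Nat.strong_induction_on generalizing k with
  | _ n ih =>
    rw [pvK]
    by_cases h : k < primes.length
    · rw [dif_pos h]
      rw [List.drop_eq_getElem_cons h, List.takeWhile_cons]
      by_cases hb : primes[k] ≤ b
      · rw [if_pos hb, ih (primes.length - (k + 1)) (by omega) (k + 1) rfl]
        simp [hb]
        omega
      · rw [if_neg hb]
        simp [hb]
    · rw [dif_neg h]
      rw [List.drop_eq_nil_of_le (by omega)]
      simp

theorem pvTake_len_takeWhile {α : Type} (q : α → Bool) :
    ∀ l : List α, l.take (l.takeWhile q).length = l.takeWhile q := by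
  intro l
  induction l with
  | nil => rfl
  | cons x xs ih =>
    rw [List.takeWhile_cons]
    by_cases h : q x
    · simp [h, List.take_succ_cons, ih]
    · simp [h]

-- main loop correspondence: A's fused fold = B's fold over the mapped prefix
theorem pvGo_empty (b a1 : Int) (ps : List Int)
    (h : ps.takeWhile (fun p => decide (p ≤ b)) = []) (ans : Int) :
    pvAGo b a1 ps ans = ans := by
  cases ps with
  | nil => rfl
  | cons p ps =>
    rw [List.takeWhile_cons] at h
    by_cases hb : p ≤ b
    · simp [hb] at h
    · rw [pvAGo, if_pos (by omega)]

theorem pvGo_eq (b a1 : Int) (ha : 0 ≤ a1) (hab : a1 ≤ b) :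
    ∀ (ps : List Int), (∀ p ∈ ps.takeWhile (fun p => decide (p ≤ b)), 2 ≤ p) → ∀ ans,
      pvAGo b a1 ps ans =
        ((ps.takeWhile (fun p => decide (p ≤ b))).map
            (fun p => PySem.Int.mod (2 * (pvLeg b p - pvLeg a1 p) + 1) pvMOD)).foldl
          (fun ans f => PySem.Int.mod (ans * f) pvMOD) ans := by
  intro ps
  induction ps with
  | nil => intro _ ans; rfl
  | cons p ps ih =>
    intro hall ans
    rw [pvAGo, List.takeWhile_cons]
    by_cases hpb : p > b
    · rw [if_pos hpb]
      simp [show ¬ p ≤ b by omega]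
    · have hle : p ≤ b := by omega
      have htw : (p :: ps).takeWhile (fun p => decide (p ≤ b)) =
          p :: ps.takeWhile (fun p => decide (p ≤ b)) := by
        rw [List.takeWhile_cons]; simp [hle]
      have hp : 2 ≤ p := hall p (htw ▸ List.mem_cons_self ..)
      rw [if_neg hpb]
      simp only [hle, decide_true, if_true, List.map_cons, List.foldl_cons]
      rw [ih (fun q hq => hall q (htw ▸ List.mem_cons_of_mem _ hq))]
      congr 1
      rw [pvInner_prime p b a1 hp ha hab]
      rw [PySem.Int.mod_eq_emod_of_pos (by norm_num [pvMOD]),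
        PySem.Int.mod_eq_emod_of_pos (by norm_num [pvMOD]),
        PySem.Int.mod_eq_emod_of_pos (by norm_num [pvMOD])]
      conv_lhs => rw [Int.mul_emod]
      conv_rhs => rw [Int.mul_emod, Int.emod_emod_of_dvd _ dvd_rfl]

-- ===== VERDICT (by name: the statement is the Claim_ definition above) =====
theorem cntPair_spec : Claim_equal_cntPair := by
  intro a b primes _ hpre
  obtain ⟨hall, hor⟩ := hpre
  unfold Spec_cntPair cntPair cntPair_alt
  rw [pvK_takeWhile b primes 0]
  simp only [Nat.zero_add, List.drop_zero]
  rw [PySem.List.slice_to_natCast, pvTake_len_takeWhile]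
  rcases hor with hemp | ⟨h1, h2⟩
  · rw [pvGo_empty b (a - 1) primes hemp, hemp]
    rfl
  · exact pvGo_eq b (a - 1) (by omega) (by omega) primes hall 1
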